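-- pv_equiv track=rewrite | github.com/Ghini/DistanceMatrixToCoords | test/test_initial_three_points.py | compute_from_to_dictionary
-- ===== SOURCE A (Python) =====
-- def compute_from_to_dictionary(from_to):
--     ftd = {}
--     for k, n in from_to:
--         ftd.setdefault(k, {})
--         ftd.setdefault(n, {})
--         ftd[k][n] = 0
--         ftd[n][k] = 0
--     return ftd
-- ===== SOURCE B (Python) =====
-- def compute_from_to_dictionary(from_to):
--     nodes = []
--     for k, n in from_to:
--         if k not in nodes:
--             nodes.append(k)
--         if n not in nodes:
--             nodes.append(n)
--     ftd = {node: {} for node in nodes}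
--     for k, n in from_to:
--         ftd[k][n] = 0
--         ftd[n][k] = 0
--     return ftd
-- ===== Notes on version B (the rewrite author's own statement) =====
-- stated objective: alternative
-- what changed: Two separate passes: first collect all nodes in first-appearance order and build the outer dict with fresh empty inner dicts up front, then a second pass over the pairs fills in the edges, instead of A's single pass lazily creating entries with setdefault.
import Mathlib
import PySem

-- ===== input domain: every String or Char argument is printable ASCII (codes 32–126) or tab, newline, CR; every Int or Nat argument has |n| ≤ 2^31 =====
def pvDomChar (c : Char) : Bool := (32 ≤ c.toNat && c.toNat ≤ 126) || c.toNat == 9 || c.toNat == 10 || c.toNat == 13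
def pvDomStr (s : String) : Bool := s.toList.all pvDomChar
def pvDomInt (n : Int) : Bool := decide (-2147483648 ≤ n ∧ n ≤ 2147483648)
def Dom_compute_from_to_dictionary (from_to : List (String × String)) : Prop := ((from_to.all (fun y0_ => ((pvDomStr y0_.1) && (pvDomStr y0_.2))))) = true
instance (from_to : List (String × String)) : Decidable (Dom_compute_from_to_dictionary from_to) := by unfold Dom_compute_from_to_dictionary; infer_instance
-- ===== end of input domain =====

-- ===== PORT A =====
def compute_from_to_dictionary (from_to : List (String × String)) : List (String × List (String × Int)) :=
  let ftd := from_to.foldl (fun ftd kn =>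
      let ftd := ftd.setdefault kn.1 PySem.Dict.empty
      let ftd := ftd.setdefault kn.2 PySem.Dict.empty
      let ftd := ftd.modify kn.1 PySem.Dict.empty (fun inner => inner.insert kn.2 0)
      ftd.modify kn.2 PySem.Dict.empty (fun inner => inner.insert kn.1 0))
    (PySem.Dict.empty : PySem.Dict String (PySem.Dict String Int))
  ftd.items.map (fun p => (p.1, p.2.items))

-- ===== PORT B =====
-- B: two passes — collect the distinct nodes first, pre-build the dict with empty
-- inner dicts, then fill in the edges; an alternative decomposition, return value only.
def pvAddNode (nodes : List String) (x : String) : List String :=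
  if nodes.contains x then nodes else nodes ++ [x]

def compute_from_to_dictionary_alt (from_to : List (String × String)) : List (String × List (String × Int)) :=
  let nodes := from_to.foldl (fun nodes kn => pvAddNode (pvAddNode nodes kn.1) kn.2) []
  -- dict comprehension {node: {} for node in nodes}: keys are distinct, so the items list is direct
  let init : PySem.Dict String (PySem.Dict String Int) :=
    PySem.Dict.mk (nodes.map (fun x => (x, PySem.Dict.empty)))
  let ftd := from_to.foldl (fun ftd kn =>
      (ftd.modify kn.1 PySem.Dict.empty (fun inner => inner.insert kn.2 0)).modify
        kn.2 PySem.Dict.empty (fun inner => inner.insert kn.1 0)) init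
  ftd.items.map (fun p => (p.1, p.2.items))

-- ===== PRECONDITION & SPEC =====
def Spec_compute_from_to_dictionary (from_to : List (String × String)) (out : List (String × List (String × Int))) : Prop := out = compute_from_to_dictionary_alt from_to
instance (from_to : List (String × String)) (out : List (String × List (String × Int))) : Decidable (Spec_compute_from_to_dictionary from_to out) := by unfold Spec_compute_from_to_dictionary; infer_instance

-- ===== CLAIM (what is proved, stated in full; the proofs are below) =====
def Claim_equal_compute_from_to_dictionary : Prop := ∀ (from_to : List (String × String)), Dom_compute_from_to_dictionary from_to → Spec_compute_from_to_dictionary from_to (compute_from_to_dictionary from_to)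

-- ===== LEMMAS AND PROOFS =====

-- A's loop body
def pvStepA (d : PySem.Dict String (PySem.Dict String Int)) (kn : String × String) : PySem.Dict String (PySem.Dict String Int) :=
  let d := d.setdefault kn.1 PySem.Dict.empty
  let d := d.setdefault kn.2 PySem.Dict.empty
  let d := d.modify kn.1 PySem.Dict.empty (fun inner => inner.insert kn.2 0)
  d.modify kn.2 PySem.Dict.empty (fun inner => inner.insert kn.1 0)

-- B's second-pass loop body
def pvStepB (d : PySem.Dict String (PySem.Dict String Int)) (kn : String × String) : PySem.Dict String (PySem.Dict String Int) :=
  (d.modify kn.1 PySem.Dict.empty (fun inner => inner.insert kn.2 0)).modify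
    kn.2 PySem.Dict.empty (fun inner => inner.insert kn.1 0)

-- extend a dict with fresh keys mapped to empty inner dicts
def pvExt (d : PySem.Dict String (PySem.Dict String Int)) (ns : List String) : PySem.Dict String (PySem.Dict String Int) :=
  PySem.Dict.mk (d.items ++ ns.map (fun x => (x, PySem.Dict.empty)))

-- the nodes of l not yet in ks, in first-appearance order
def pvFresh (ks : List String) : List (String × String) → List String
  | [] => []
  | kn :: l =>
      let a := if ks.contains kn.1 then [] else [kn.1]
      let b := if (ks ++ a).contains kn.2 then [] else [kn.2]
      a ++ b ++ pvFresh (ks ++ a ++ b) l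

theorem pv_contains_iff (d : PySem.Dict String (PySem.Dict String Int)) (k : String) :
    d.contains k = true ↔ k ∈ d.keys := by
  simp [PySem.Dict.contains, PySem.Dict.keys, List.any_eq_true, List.mem_map]

theorem pv_keys_ext (d : PySem.Dict String (PySem.Dict String Int)) (ns : List String) :
    (pvExt d ns).keys = d.keys ++ ns := by
  simp [pvExt, PySem.Dict.keys, Function.comp_def]

theorem pv_ext_nil (d : PySem.Dict String (PySem.Dict String Int)) : pvExt d [] = d := by
  simp [pvExt]

theorem pv_ext_ext (d : PySem.Dict String (PySem.Dict String Int)) (ns ms : List String) :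
    pvExt (pvExt d ns) ms = pvExt d (ns ++ ms) := by
  simp [pvExt]

theorem pv_get?_ext (d : PySem.Dict String (PySem.Dict String Int)) (ns : List String)
    (k : String) (hk : k ∈ d.keys) : (pvExt d ns).get? k = d.get? k := by
  simp only [PySem.Dict.get?, pvExt, List.find?_append]
  have : (d.items.find? (fun p => p.1 == k)).isSome := by
    rw [List.find?_isSome]
    simp only [PySem.Dict.keys, List.mem_map] at hk
    obtain ⟨p, hp, hpk⟩ := hk
    exact ⟨p, hp, by simp [hpk]⟩
  obtain ⟨v, hv⟩ := Option.isSome_iff_exists.mp this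
  simp [hv]

theorem pv_contains_true (d : PySem.Dict String (PySem.Dict String Int)) (k : String)
    (hk : k ∈ d.keys) : d.contains k = true := (pv_contains_iff d k).mpr hk

theorem pv_keys_modify (d : PySem.Dict String (PySem.Dict String Int)) (k : String)
    (f : PySem.Dict String Int → PySem.Dict String Int) (hk : k ∈ d.keys) :
    (d.modify k PySem.Dict.empty f).keys = d.keys := by
  simp only [PySem.Dict.modify, PySem.Dict.insert, pv_contains_true d k hk, if_true,
    PySem.Dict.keys, List.map_map]
  apply List.map_congr_left
  intro p _
  by_cases h : p.1 = k
  · simp [h]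
  · simp [h]

theorem pv_modify_ext (d : PySem.Dict String (PySem.Dict String Int)) (ns : List String)
    (k : String) (f : PySem.Dict String Int → PySem.Dict String Int)
    (hk : k ∈ d.keys) (hns : ∀ y ∈ ns, y ≠ k) :
    (pvExt d ns).modify k PySem.Dict.empty f = pvExt (d.modify k PySem.Dict.empty f) ns := by
  have hc : (pvExt d ns).contains k = true := by
    apply pv_contains_true; rw [pv_keys_ext]; exact List.mem_append_left _ hk
  have hg : (pvExt d ns).getD k PySem.Dict.empty = d.getD k PySem.Dict.empty := by
    simp [PySem.Dict.getD, pv_get?_ext d ns k hk]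
  simp only [PySem.Dict.modify, hg, PySem.Dict.insert, hc, pv_contains_true d k hk, if_true]
  simp only [pvExt, List.map_append, List.map_map]
  congr 2
  apply List.map_congr_left
  intro y hy
  have hyk : y ≠ k := hns y hy
  simp [hyk]

theorem pv_fresh_not_mem (l : List (String × String)) (ks : List String) (x : String)
    (hx : x ∈ pvFresh ks l) : x ∉ ks := by
  induction l generalizing ks with
  | nil => simp [pvFresh] at hx
  | cons kn l ih =>
    simp only [pvFresh, List.mem_append] at hx
    intro hmem
    rcases hx with (hx | hx) | hx
    · split at hx <;> simp_all
    · split at hx <;> simp_all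
    · exact ih _ hx (by simp [hmem])

theorem pv_setdefault_ext (d : PySem.Dict String (PySem.Dict String Int)) (k : String) :
    d.setdefault k PySem.Dict.empty = pvExt d (if d.keys.contains k then [] else [k]) := by
  by_cases h : k ∈ d.keys
  · simp [PySem.Dict.setdefault, pv_contains_true d k h, h, pv_ext_nil]
  · have hc : d.contains k = false := by
      rw [← Bool.not_eq_true, pv_contains_iff]; exact h
    simp [PySem.Dict.setdefault, hc, h, pvExt]

theorem pv_nodes_foldl (l : List (String × String)) (ks : List String) :
    l.foldl (fun nodes kn => pvAddNode (pvAddNode nodes kn.1) kn.2) ks = ks ++ pvFresh ks l := by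
  induction l generalizing ks with
  | nil => simp [pvFresh]
  | cons kn l ih =>
    simp only [List.foldl_cons, pvFresh]
    rw [show pvAddNode (pvAddNode ks kn.1) kn.2 =
        (ks ++ (if ks.contains kn.1 then [] else [kn.1])) ++
          (if (ks ++ (if ks.contains kn.1 then [] else [kn.1])).contains kn.2 then []
            else [kn.2]) by
      unfold pvAddNode
      split <;> split <;> simp_all]
    rw [ih]
    simp

theorem pv_stepA_eq (d : PySem.Dict String (PySem.Dict String Int)) (kn : String × String) :
    pvStepA d kn =
      pvStepB (pvExt d ((if d.keys.contains kn.1 then [] else [kn.1]) ++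
        (if (d.keys ++ (if d.keys.contains kn.1 then [] else [kn.1])).contains kn.2 then []
          else [kn.2]))) kn := by
  show (((d.setdefault kn.1 PySem.Dict.empty).setdefault kn.2 PySem.Dict.empty).modify
      kn.1 PySem.Dict.empty (fun inner => inner.insert kn.2 0)).modify
      kn.2 PySem.Dict.empty (fun inner => inner.insert kn.1 0) = _
  rw [pv_setdefault_ext d kn.1, pv_setdefault_ext (pvExt d _) kn.2, pv_keys_ext, pv_ext_ext]
  rfl

theorem pv_main (l : List (String × String)) (d : PySem.Dict String (PySem.Dict String Int)) :
    l.foldl pvStepA d = l.foldl pvStepB (pvExt d (pvFresh d.keys l)) := by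
  induction l generalizing d with
  | nil => simp [pvFresh, pv_ext_nil]
  | cons kn l ih =>
    simp only [List.foldl_cons]
    set a := (if d.keys.contains kn.1 then [] else [kn.1]) with ha
    set b := (if (d.keys ++ a).contains kn.2 then [] else [kn.2]) with hb
    have hfresh : pvFresh d.keys (kn :: l) = a ++ b ++ pvFresh (d.keys ++ a ++ b) l := by
      rw [hb, ha]; rfl
    have hk1 : kn.1 ∈ d.keys ++ a := by
      by_cases h : kn.1 ∈ d.keys
      · exact List.mem_append_left _ h
      · rw [ha]; simp [h]
    have hk1' : kn.1 ∈ (pvExt d (a ++ b)).keys := by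
      rw [pv_keys_ext, ← List.append_assoc]
      exact List.mem_append_left _ hk1
    have hk2 : kn.2 ∈ (pvExt d (a ++ b)).keys := by
      rw [pv_keys_ext, ← List.append_assoc]
      by_cases h : kn.2 ∈ d.keys ++ a
      · exact List.mem_append_left _ h
      · rw [hb]; simp [h]
    have hk2' : kn.2 ∈ d.keys ++ a ++ b := by
      rw [List.append_assoc]; rwa [pv_keys_ext] at hk2
    set rest := pvFresh (d.keys ++ a ++ b) l with hrest
    have hdisj : ∀ y ∈ rest, y ∉ d.keys ++ a ++ b := fun y hy => pv_fresh_not_mem l _ y hy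
    have hr1 : ∀ y ∈ rest, y ≠ kn.1 := by
      intro y hy he
      exact hdisj y hy (by rw [he]; exact List.mem_append_left _ hk1)
    have hr2 : ∀ y ∈ rest, y ≠ kn.2 := by
      intro y hy he
      exact hdisj y hy (by rw [he]; exact hk2')
    have hstep : pvStepB (pvExt d (pvFresh d.keys (kn :: l))) kn =
        pvExt (pvStepA d kn) rest := by
      rw [hfresh, ← pv_ext_ext, pv_stepA_eq, ← ha, ← hb]
      unfold pvStepB
      rw [pv_modify_ext _ rest kn.1 _ hk1' hr1,
        pv_modify_ext _ rest kn.2 _ (by rwa [pv_keys_modify _ _ _ hk1']) hr2]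
    have hkeys : (pvStepA d kn).keys = d.keys ++ a ++ b := by
      rw [pv_stepA_eq, ← ha, ← hb]
      unfold pvStepB
      rw [pv_keys_modify _ _ _ (by rwa [pv_keys_modify _ _ _ hk1']),
        pv_keys_modify _ _ _ hk1', pv_keys_ext, List.append_assoc]
    rw [hstep, ih (pvStepA d kn), hkeys, ← hrest]

-- ===== VERDICT (by name: the statement is the Claim_ definition above) =====
theorem compute_from_to_dictionary_spec : Claim_equal_compute_from_to_dictionary := by
  intro l _
  unfold Spec_compute_from_to_dictionary compute_from_to_dictionary compute_from_to_dictionary_alt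
  show (l.foldl pvStepA PySem.Dict.empty).items.map (fun p => (p.1, p.2.items)) =
    (l.foldl pvStepB (PySem.Dict.mk
        ((l.foldl (fun nodes kn => pvAddNode (pvAddNode nodes kn.1) kn.2) []).map
          (fun x => (x, PySem.Dict.empty))))).items.map (fun p => (p.1, p.2.items))
  rw [pv_nodes_foldl l [], pv_main l PySem.Dict.empty]
  rfl
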